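-- pv_equiv track=rewrite | github.com/cisaic/coral-patterns | coral_patterns/metrics.py | tip_count
-- ===== SOURCE A (Python) =====
-- NEIGHBORS8 = [
--     (1, 0), (-1, 0), (0, 1), (0, -1),
--     (1, 1), (-1, 1), (1, -1), (-1, -1)
-- ]
--
-- def tip_count(cluster):
--     """Tips = sites with exactly 1 occupied neighbor in 8-neighborhood."""
--     tips = 0
--     for (x, y) in cluster:
--         n = 0
--         for dx, dy in NEIGHBORS8:
--             if (x + dx, y + dy) in cluster:
--                 n += 1
--         if n == 1:
--             tips += 1
--     return tips
-- ===== SOURCE B (Python) =====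
-- NEIGHBORS8 = [
--     (1, 0), (-1, 0), (0, 1), (0, -1),
--     (1, 1), (-1, 1), (1, -1), (-1, -1)
-- ]
--
-- def tip_count(cluster):
--     """Tips = sites with exactly 1 occupied neighbor in 8-neighborhood."""
--     count = {}
--     for (x, y) in set(cluster):
--         for dx, dy in NEIGHBORS8:
--             k = (x + dx, y + dy)
--             count[k] = count.get(k, 0) + 1
--     tips = 0
--     for c in cluster:
--         if count.get(c, 0) == 1:
--             tips += 1
--     return tips
-- ===== Notes on version B (the rewrite author's own statement) =====
-- stated objective: alternative
-- what changed: Replaces the per-point scan of all 8 neighbors against the whole list with a single scatter pass: a dict neighbor-count table is built once over the distinct occupied sites, then points are tallied by one O(1) lookup each.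
import Mathlib
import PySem

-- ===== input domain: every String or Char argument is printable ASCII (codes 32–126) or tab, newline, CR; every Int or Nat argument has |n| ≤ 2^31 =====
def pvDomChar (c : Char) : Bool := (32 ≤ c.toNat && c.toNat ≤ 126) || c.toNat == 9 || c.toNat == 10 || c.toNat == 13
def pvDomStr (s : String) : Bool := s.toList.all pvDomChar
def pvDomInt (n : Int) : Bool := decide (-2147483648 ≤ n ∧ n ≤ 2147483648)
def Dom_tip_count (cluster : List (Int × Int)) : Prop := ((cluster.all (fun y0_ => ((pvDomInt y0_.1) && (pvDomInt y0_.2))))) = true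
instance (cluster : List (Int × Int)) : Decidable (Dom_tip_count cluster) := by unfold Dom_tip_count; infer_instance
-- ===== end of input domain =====

-- B replaces A's per-point scan of all 8 neighbors against the whole list by a dict
-- neighbor-count table scattered once over the distinct occupied sites (objective: alternative algorithm).

-- ===== PORT A =====
def NEIGHBORS8 : List (Int × Int) :=
  [(1, 0), (-1, 0), (0, 1), (0, -1), (1, 1), (-1, 1), (1, -1), (-1, -1)]

def tip_count (cluster : List (Int × Int)) : Int :=
  cluster.foldl (fun tips c =>
    let n : Int := NEIGHBORS8.foldl (fun n d =>
      if (c.1 + d.1, c.2 + d.2) ∈ cluster then n + 1 else n) 0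
    if n = 1 then tips + 1 else tips) 0

-- ===== PORT B =====
def tip_count_alt (cluster : List (Int × Int)) : Int :=
  let count : PySem.Dict (Int × Int) Int :=
    (PySem.Set.ofList cluster).foldl (fun dct s =>
      NEIGHBORS8.foldl (fun dct d => dct.modify (s.1 + d.1, s.2 + d.2) 0 (· + 1)) dct)
      PySem.Dict.empty
  cluster.foldl (fun tips c => if count.getD c 0 = 1 then tips + 1 else tips) 0

-- ===== PRECONDITION & SPEC =====
def Spec_tip_count (cluster : List (Int × Int)) (out : Int) : Prop := out = tip_count_alt cluster
instance (cluster : List (Int × Int)) (out : Int) : Decidable (Spec_tip_count cluster out) := by unfold Spec_tip_count; infer_instance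

-- ===== CLAIM (what is proved, stated in full; the proofs are below) =====
def Claim_equal_tip_count : Prop := ∀ (cluster : List (Int × Int)), Dom_tip_count cluster → Spec_tip_count cluster (tip_count cluster)

-- ===== LEMMAS AND PROOFS =====

-- a counting foldl is a countP
theorem pv_foldl_count {α : Type} (p : α → Prop) [DecidablePred p] (l : List α) (i : Int) :
    l.foldl (fun n d => if p d then n + 1 else n) i = i + (l.countP (fun d => decide (p d)) : Int) := by
  induction l generalizing i with
  | nil => simp
  | cons a t ih =>
    by_cases h : p a
    · simp [h, ih]; ring
    · simp [h, ih]

-- count over a flatMap is the sum of the per-block counts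
theorem pv_count_flatMap {α β : Type} [BEq β] (f : α → List β) (l : List α) (c : β) :
    (l.flatMap f).count c = (l.map (fun s => (f s).count c)).sum := by
  induction l with
  | nil => rfl
  | cons a t ih => simp [List.flatMap_cons, List.count_append, ih]

theorem pv_sum_map_add {β : Type} (m : List β) (f g : β → Nat) :
    (m.map (fun b => f b + g b)).sum = (m.map f).sum + (m.map g).sum := by
  induction m with
  | nil => rfl
  | cons a t ih => simp [ih]; omega

theorem pv_sum_indicator {β : Type} (m : List β) (q : β → Bool) :
    (m.map (fun b => if q b then 1 else 0)).sum = m.countP q := by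
  induction m with
  | nil => rfl
  | cons a t ih =>
    by_cases h : q a
    · simp [h, ih]; omega
    · simp [h, ih]

theorem pv_sum_indicator' {β : Type} (m : List β) (p : β → Prop) [DecidablePred p] :
    (m.map (fun b => if p b then 1 else 0)).sum = m.countP (fun b => decide (p b)) := by
  induction m with
  | nil => rfl
  | cons a t ih =>
    by_cases h : p a
    · simp [h, ih]; omega
    · simp [h, ih]

-- exchange of a double count
theorem pv_swap {α β : Type} (l : List α) (m : List β) (p : β → α → Bool) :
    (l.map (fun a => m.countP (fun b => p b a))).sum
      = (m.map (fun b => l.countP (fun a => p b a))).sum := by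
  induction l with
  | nil => simp
  | cons a t ih =>
    simp only [List.map_cons, List.sum_cons, List.countP_cons, ih]
    have h : (m.map (fun b => t.countP (fun a => p b a) + if p b a then 1 else 0)).sum
        = (m.map (fun b => t.countP (fun a => p b a))).sum + m.countP (fun b => p b a) := by
      rw [pv_sum_map_add, pv_sum_indicator]
    rw [h]; omega

theorem pv_count_nodup {α : Type} [BEq α] [LawfulBEq α] (l : List α) (h : l.Nodup) (x : α) :
    l.count x = if x ∈ l then 1 else 0 := by
  by_cases hx : x ∈ l
  · simp [hx, List.count_eq_one_of_mem h hx]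
  · simp [hx, List.count_eq_zero_of_not_mem hx]

-- NEIGHBORS8 is closed under negation
theorem pv_neg_perm : (NEIGHBORS8.map (fun d => (-d.1, -d.2))).Perm NEIGHBORS8 := by decide

-- the key characterisation: the scattered table holds, at c, the number of
-- 8-neighbor offsets leading from c into the nodup list occ
theorem pv_table (occ : List (Int × Int)) (hnd : occ.Nodup) (c : Int × Int) :
    ((occ.flatMap (fun s => NEIGHBORS8.map (fun d => (s.1 + d.1, s.2 + d.2)))).count c : Nat)
      = NEIGHBORS8.countP (fun d => decide ((c.1 + d.1, c.2 + d.2) ∈ occ)) := by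
  rw [pv_count_flatMap]
  have h1 : ∀ s : Int × Int,
      ((NEIGHBORS8.map (fun d => (s.1 + d.1, s.2 + d.2))).count c)
        = NEIGHBORS8.countP (fun d => (s.1 + d.1, s.2 + d.2) == c) := by
    intro s
    rw [List.count_eq_countP, List.countP_map]
    rfl
  simp only [h1]
  rw [pv_swap]
  have h2 : ∀ d : Int × Int,
      occ.countP (fun s => (s.1 + d.1, s.2 + d.2) == c)
        = if ((c.1 - d.1, c.2 - d.2) : Int × Int) ∈ occ then 1 else 0 := by
    intro d
    have : occ.countP (fun s => (s.1 + d.1, s.2 + d.2) == c)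
        = occ.countP (fun s => s == ((c.1 - d.1, c.2 - d.2) : Int × Int)) := by
      apply List.countP_congr
      intro s _
      constructor <;> intro h <;>
        · simp only [beq_iff_eq, Prod.ext_iff] at h ⊢
          omega
    rw [this, ← List.count_eq_countP, pv_count_nodup occ hnd]
  simp only [h2]
  rw [pv_sum_indicator']
  have h3 : NEIGHBORS8.countP (fun d => decide (((c.1 - d.1, c.2 - d.2) : Int × Int) ∈ occ))
      = (NEIGHBORS8.map (fun d => (-d.1, -d.2))).countP
          (fun d => decide (((c.1 - d.1, c.2 - d.2) : Int × Int) ∈ occ)) :=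
    (pv_neg_perm.countP_eq _).symm
  rw [h3, List.countP_map]
  apply List.countP_congr
  intro d _
  simp only [Function.comp_apply, decide_eq_true_eq]
  have e1 : c.1 - -d.1 = c.1 + d.1 := by ring
  have e2 : c.2 - -d.2 = c.2 + d.2 := by ring
  rw [e1, e2]

-- the dict built by B's scatter loop agrees at every point with A's inner counting loop
theorem pv_getD (cluster : List (Int × Int)) (c : Int × Int) :
    ((PySem.Set.ofList cluster).foldl (fun dct s =>
        NEIGHBORS8.foldl (fun dct d => dct.modify (s.1 + d.1, s.2 + d.2) 0 (· + 1)) dct)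
        PySem.Dict.empty).getD c 0
      = NEIGHBORS8.foldl (fun n d =>
          if (c.1 + d.1, c.2 + d.2) ∈ cluster then n + 1 else n) (0 : Int) := by
  have hmap : ∀ (s : Int × Int) (dct : PySem.Dict (Int × Int) Int),
      NEIGHBORS8.foldl (fun dct d => dct.modify (s.1 + d.1, s.2 + d.2) 0 (· + 1)) dct
        = (NEIGHBORS8.map (fun d => (s.1 + d.1, s.2 + d.2))).foldl
            (fun dct k => dct.modify k 0 (· + 1)) dct := by
    intro s dct; rw [List.foldl_map]
  calc ((PySem.Set.ofList cluster).foldl (fun dct s =>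
        NEIGHBORS8.foldl (fun dct d => dct.modify (s.1 + d.1, s.2 + d.2) 0 (· + 1)) dct)
        PySem.Dict.empty).getD c 0
      = (((PySem.Set.ofList cluster).flatMap
            (fun s => NEIGHBORS8.map (fun d => (s.1 + d.1, s.2 + d.2)))).foldl
            (fun dct k => dct.modify k 0 (· + 1)) PySem.Dict.empty).getD c 0 := by
        rw [List.foldl_flatMap]
        simp only [hmap]
    _ = PySem.Dict.empty.getD c 0
          + (((PySem.Set.ofList cluster).flatMap
              (fun s => NEIGHBORS8.map (fun d => (s.1 + d.1, s.2 + d.2)))).count c : Int) := by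
        rw [PySem.Dict.getD_foldl_modify_add_one]
    _ = (NEIGHBORS8.countP (fun d => decide ((c.1 + d.1, c.2 + d.2) ∈ PySem.Set.ofList cluster)) : Int) := by
        rw [pv_table _ (PySem.Set.nodup_ofList cluster) c]
        simp [PySem.Dict.getD_empty]
    _ = (NEIGHBORS8.countP (fun d => decide ((c.1 + d.1, c.2 + d.2) ∈ cluster)) : Int) := by
        congr 1
        apply List.countP_congr
        intro d _
        simp [PySem.Set.mem_ofList]
    _ = NEIGHBORS8.foldl (fun n d =>
          if (c.1 + d.1, c.2 + d.2) ∈ cluster then n + 1 else n) (0 : Int) := by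
        rw [pv_foldl_count (fun d => (c.1 + d.1, c.2 + d.2) ∈ cluster) NEIGHBORS8 0]
        simp

-- ===== VERDICT (by name: the statement is the Claim_ definition above) =====
theorem tip_count_spec : Claim_equal_tip_count := by
  intro cluster _
  unfold Spec_tip_count tip_count tip_count_alt
  apply PySem.List.foldl_congr_mem
  intro tips c _
  rw [pv_getD cluster c]
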